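-- pv_equiv track=rewrite | github.com/prernachoudhary88/5203389_Prerna-Choudhary | HackerRank/Week 2/sumVSxor.py | sumXor
-- ===== SOURCE A (Python) =====
-- def sumXor(n):
--
--     if n == 0:
--         return 1
--
--     count_zero_bits = 0
--     for bit in bin(n)[2:]:
--         if bit == '0':
--             count_zero_bits += 1
--
--     return 2 ** count_zero_bits
-- ===== SOURCE B (Python) =====
-- def sumXor(n):
--     # Recurse on abs(n) by halving: each even remainder doubles the result.
--     # No string conversion, no bit counting, no exponentiation; n == 0 needs no special case.
--     def go(m):
--         if m == 0:
--             return 1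
--         return (2 - m % 2) * go(m // 2)
--     return go(abs(n))
-- ===== Notes on version B (the rewrite author's own statement) =====
-- stated objective: alternative
-- what changed: Replaces A's string scan of bin(n) followed by 2**count with a purely arithmetic recursion on abs(n): halve the number, multiplying the result by 2 on each even remainder, so no string, no counter and no final exponentiation are used and n==0 needs no special case.
import Mathlib
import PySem

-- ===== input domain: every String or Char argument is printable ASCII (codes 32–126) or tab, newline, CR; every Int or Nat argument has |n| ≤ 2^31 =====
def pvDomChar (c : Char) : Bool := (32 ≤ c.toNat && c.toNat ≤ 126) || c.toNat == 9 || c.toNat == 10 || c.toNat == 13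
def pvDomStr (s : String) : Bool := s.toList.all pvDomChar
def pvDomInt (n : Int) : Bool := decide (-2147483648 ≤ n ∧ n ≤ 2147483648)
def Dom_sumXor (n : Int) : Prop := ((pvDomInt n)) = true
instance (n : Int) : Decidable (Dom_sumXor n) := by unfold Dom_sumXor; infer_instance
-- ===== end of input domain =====

-- B replaces A's scan of bin(n) + 2**count with an arithmetic halving recursion on abs(n); objective: alternative.


-- ===== PORT A =====
-- binary digits of m (MSB first), empty for 0; bin(m) for m>0 is '0'+'b'+these digits
def pvBinDigits (m : Nat) : List Char :=
  if m = 0 then [] else pvBinDigits (m / 2) ++ [if m % 2 = 1 then '1' else '0']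

-- Python's bin(n) as a char list: sign, then "0b", then digits of |n| (exact for n ≠ 0, the only case A uses it)
def pvBin (n : Int) : List Char :=
  (if n < 0 then ['-', '0', 'b'] else ['0', 'b']) ++ pvBinDigits n.natAbs

def sumXor (n : Int) : Int :=
  if n = 0 then 1
  else
    -- bin(n)[2:] on a list of length ≥ 2 is exactly List.drop 2
    let count_zero_bits : Nat :=
      ((pvBin n).drop 2).foldl (fun acc bit => if bit = '0' then acc + 1 else acc) 0
    2 ^ count_zero_bits

-- ===== PORT B =====
-- go(m): halving recursion, multiplying by 2 on each even remainder
def pvGo (m : Nat) : Int :=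
  if m = 0 then 1 else (2 - (m % 2 : Int)) * pvGo (m / 2)

def sumXor_alt (n : Int) : Int := pvGo n.natAbs

-- ===== PRECONDITION & SPEC =====
def Spec_sumXor (n : Int) (out : Int) : Prop := out = sumXor_alt n
instance (n : Int) (out : Int) : Decidable (Spec_sumXor n out) := by unfold Spec_sumXor; infer_instance

-- ===== CLAIM (what is proved, stated in full; the proofs are below) =====
def Claim_equal_sumXor : Prop := ∀ (n : Int), Dom_sumXor n → Spec_sumXor n (sumXor n)

-- ===== LEMMAS AND PROOFS =====
lemma pvFoldl_count (l : List Char) (a : Nat) :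
    l.foldl (fun acc bit => if bit = '0' then acc + 1 else acc) a = a + l.count '0' := by
  induction l generalizing a with
  | nil => simp
  | cons c t ih =>
    simp only [List.foldl_cons, List.count_cons, ih]
    by_cases h : c = '0' <;> simp [h] <;> omega

lemma pvGo_eq_pow (m : Nat) : pvGo m = 2 ^ (pvBinDigits m).count '0' := by
  induction m using Nat.strong_induction_on with
  | _ m ih =>
    by_cases h : m = 0
    · simp [pvGo, pvBinDigits, h]
    · have hd := ih (m / 2) (Nat.div_lt_self (Nat.pos_of_ne_zero h) one_lt_two)
      rw [pvGo, pvBinDigits]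
      simp only [h, if_false]
      rw [List.count_append, hd]
      have h2' : ((m : Int) % 2) = ((m % 2 : Nat) : Int) := (Int.natCast_mod m 2).symm
      rcases Nat.mod_two_eq_zero_or_one m with h2 | h2 <;>
        rw [h2'] <;> simp [h2, pow_succ, mul_comm]

-- ===== VERDICT (by name: the statement is the Claim_ definition above) =====
theorem sumXor_spec : Claim_equal_sumXor := by
  intro n _
  unfold Spec_sumXor sumXor sumXor_alt
  by_cases h : n = 0
  · simp [h, pvGo]
  · simp only [h, if_false, pvBin]
    have hcount : List.foldl (fun acc bit => if bit = '0' then acc + 1 else acc) 0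
        (((if n < 0 then ['-', '0', 'b'] else ['0', 'b']) ++ pvBinDigits n.natAbs).drop 2)
        = (pvBinDigits n.natAbs).count '0' := by
      by_cases hn : n < 0 <;> simp [hn, pvFoldl_count]
    rw [hcount, pvGo_eq_pow]
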